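-- pv_equiv track=rewrite | github.com/soileks/Perfect-Colorings | Perfect colorings Petersen Graph.py | matrices_are_equivalent
-- ===== SOURCE A (Python) =====
-- import itertools
--
-- def matrices_are_equivalent(mat1, mat2):
--     """Проверка эквивалентности двух матриц."""
--     k = len(mat1)
--     for row_perm in itertools.permutations(range(k)):
--         permuted_mat1 = [mat1[i] for i in row_perm]
--         for col_perm in itertools.permutations(range(k)):
--             permuted_col_mat1 = [[permuted_mat1[i][j] for j in col_perm] for i in range(k)]
--             if permuted_col_mat1 == mat2:
--                 return True
--     return False
-- ===== SOURCE B (Python) =====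
-- import itertools
--
-- def matrices_are_equivalent(mat1, mat2):
--     """Check matrix equivalence up to row/column permutations: for each row
--     permutation, compare the multiset of column vectors (first k entries of
--     each row) instead of trying every column permutation."""
--     k = len(mat1)
--     if len(mat2) != k or any(len(r) != k for r in mat2):
--         return False
--     cols2 = [[mat2[i][j] for i in range(k)] for j in range(k)]
--     for row_perm in itertools.permutations(range(k)):
--         cols1 = [[mat1[i][j] for i in row_perm] for j in range(k)]
--         if all(cols1.count(c) == cols2.count(c) for c in cols2):
--             return True
--     return False
-- ===== Notes on version B (the rewrite author's own statement) =====
-- stated objective: alternative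
-- what changed: Drops the inner loop over all k! column permutations: after a shape check, B fixes each row permutation and compares the multiset of column vectors of the two matrices (column-count comparison), which is equivalent to the existence of a column permutation.
import Mathlib
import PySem

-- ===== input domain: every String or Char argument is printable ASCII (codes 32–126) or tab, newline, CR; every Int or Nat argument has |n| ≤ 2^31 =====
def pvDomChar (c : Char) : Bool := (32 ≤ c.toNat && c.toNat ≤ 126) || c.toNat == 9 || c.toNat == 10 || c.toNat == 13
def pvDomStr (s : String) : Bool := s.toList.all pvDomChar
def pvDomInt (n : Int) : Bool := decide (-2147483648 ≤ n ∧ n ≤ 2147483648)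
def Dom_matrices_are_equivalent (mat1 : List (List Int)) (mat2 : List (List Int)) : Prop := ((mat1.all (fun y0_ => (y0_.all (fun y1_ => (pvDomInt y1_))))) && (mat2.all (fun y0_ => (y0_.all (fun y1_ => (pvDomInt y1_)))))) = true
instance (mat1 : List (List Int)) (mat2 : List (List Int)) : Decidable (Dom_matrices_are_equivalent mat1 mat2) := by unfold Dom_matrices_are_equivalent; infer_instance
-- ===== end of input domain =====

-- B replaces A's inner loop over all k! column permutations by a single multiset
-- comparison of column vectors per row permutation (objective: alternative).

-- ===== PORT A =====
-- Literal port of A. mat1[i] / permuted_mat1[i][j] use getD: every index taken is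
-- in range on Pre_ (i < k = len(mat1), j < k ≤ len(row)), so getD is exact there.
def matrices_are_equivalent (mat1 : List (List Int)) (mat2 : List (List Int)) : Bool :=
  let k := mat1.length
  (PySem.List.permutations (List.range k) k).any (fun rowPerm =>
    let pm1 := rowPerm.map (fun i => mat1.getD i [])
    (PySem.List.permutations (List.range k) k).any (fun colPerm =>
      decide ((List.range k).map (fun i => colPerm.map (fun j => (pm1.getD i []).getD j 0)) = mat2)))

-- ===== PORT B =====
-- Literal port of Source B: shape check, then for each row permutation compare the
-- multiset of column vectors by counting (all indices in range on Pre_, getD exact).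
def matrices_are_equivalent_alt (mat1 : List (List Int)) (mat2 : List (List Int)) : Bool :=
  let k := mat1.length
  if mat2.length == k && mat2.all (fun r => r.length == k) then
    let cols2 := (List.range k).map (fun j => (List.range k).map (fun i => (mat2.getD i []).getD j 0))
    (PySem.List.permutations (List.range k) k).any (fun rowPerm =>
      let cols1 := (List.range k).map (fun j => rowPerm.map (fun i => (mat1.getD i []).getD j 0))
      cols2.all (fun c => cols1.count c == cols2.count c))
  else false

-- ===== PRECONDITION & SPEC =====
-- Python A raises IndexError as soon as some row of mat1 is shorter than len(mat1)
-- (the first constructed matrix already reads every row at columns 0..k-1);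
-- Pre_ excludes exactly those inputs. mat2 is unconstrained.
def Pre_matrices_are_equivalent (mat1 : List (List Int)) (mat2 : List (List Int)) : Prop :=
  ∀ row ∈ mat1, mat1.length ≤ row.length
instance (mat1 : List (List Int)) (mat2 : List (List Int)) : Decidable (Pre_matrices_are_equivalent mat1 mat2) := by unfold Pre_matrices_are_equivalent; infer_instance

def pvWitness_matrices_are_equivalent : List (List Int) × List (List Int) :=
  ([[1, 0], [0, 2]], [[2, 0], [0, 1]])

def Spec_matrices_are_equivalent (mat1 : List (List Int)) (mat2 : List (List Int)) (out : Bool) : Prop := out = matrices_are_equivalent_alt mat1 mat2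
instance (mat1 : List (List Int)) (mat2 : List (List Int)) (out : Bool) : Decidable (Spec_matrices_are_equivalent mat1 mat2 out) := by unfold Spec_matrices_are_equivalent; infer_instance

-- ===== CLAIM (what is proved, stated in full; the proofs are below) =====
def Claim_equal_matrices_are_equivalent : Prop := ∀ (mat1 : List (List Int)) (mat2 : List (List Int)), Dom_matrices_are_equivalent mat1 mat2 → Pre_matrices_are_equivalent mat1 mat2 → Spec_matrices_are_equivalent mat1 mat2 (matrices_are_equivalent mat1 mat2)

-- ===== LEMMAS AND PROOFS =====

-- range-indexed map over getD collapses to a plain map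
theorem pv_range_map_getD {α β : Type} (l : List α) (d : α) (g : α → β) :
    (List.range l.length).map (fun i => g (l.getD i d)) = l.map g := by
  apply List.ext_getElem
  · simp
  · intro i h1 h2
    simp at h1 ⊢
    simp [List.getElem?_eq_getElem (show i < l.length by simpa using h2)]

-- completeness of PySem.List.permutations: every permutation of xs is enumerated
theorem pv_mem_permutations_of_perm {α : Type} :
    ∀ (n : ℕ) (xs p : List α), xs.length = n → p.Perm xs →
      p ∈ PySem.List.permutations xs n := by
  intro n
  induction n with
  | zero =>
    intro xs p hlen hp
    have hxs : xs = [] := List.eq_nil_of_length_eq_zero hlen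
    subst hxs
    have : p = [] := List.Perm.eq_nil hp
    simp [this, PySem.List.permutations_zero]
  | succ n ih =>
    intro xs p hlen hp
    match p, List.Perm.length_eq hp ▸ hlen with
    | y :: p', _ =>
      have hy : y ∈ xs := hp.mem_iff.mp (by simp)
      obtain ⟨i, hi, hgi⟩ := List.getElem_of_mem hy
      have hgi? : xs[i]? = some y := by
        rw [List.getElem?_eq_getElem hi, hgi]
      have hperm0 : (y :: xs.eraseIdx i).Perm xs := PySem.List.perm_cons_eraseIdx xs hgi?
      have hp' : p'.Perm (xs.eraseIdx i) := (hp.trans hperm0.symm).cons_inv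
      have hlen' : (xs.eraseIdx i).length = n := by
        rw [List.length_eraseIdx_of_lt hi]; omega
      have hmem := ih (xs.eraseIdx i) p' hlen' hp'
      rw [PySem.List.permutations_succ]
      refine List.mem_flatMap.mpr ⟨i, List.mem_range.mpr hi, ?_⟩
      rw [hgi?]
      exact List.mem_map.mpr ⟨p', hmem, rfl⟩

-- extraction: a permutation of a mapped list is the map of a permuted preimage
theorem pv_exists_preimage_perm {α β : Type} (f : α → β) :
    ∀ {t u : List β}, t.Perm u → ∀ s : List α, u = s.map f →
      ∃ s' : List α, s'.Perm s ∧ t = s'.map f := by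
  intro t u h
  induction h with
  | nil =>
    intro s hs
    rw [eq_comm, List.map_eq_nil_iff] at hs
    exact ⟨[], by simp [hs], rfl⟩
  | cons x h ih =>
    intro s hs
    obtain ⟨a, s₂, rfl, ha, hs₂⟩ := List.map_eq_cons_iff.mp hs.symm
    obtain ⟨s', hs', ht⟩ := ih s₂ hs₂.symm
    exact ⟨a :: s', hs'.cons a, by simp [ha, ht]⟩
  | swap x y l =>
    intro s hs
    obtain ⟨a, s₂, rfl, ha, hs₂⟩ := List.map_eq_cons_iff.mp hs.symm
    obtain ⟨b, s₃, rfl, hb, hs₃⟩ := List.map_eq_cons_iff.mp hs₂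
    exact ⟨b :: a :: s₃, List.Perm.swap a b s₃, by simp [ha, hb, hs₃]⟩
  | trans h1 h2 ih1 ih2 =>
    intro s hs
    obtain ⟨s₂, hs₂, hm⟩ := ih2 s hs
    obtain ⟨s₁, hs₁, ht⟩ := ih1 s₂ hm
    exact ⟨s₁, hs₁.trans hs₂, ht⟩

-- List.count does not depend on the (lawful) BEq instance
theorem pv_count_inst {α : Type} [BEq α] [LawfulBEq α] [DecidableEq α] (a : α) (l : List α) :
    l.count a = @List.count α instBEqOfDecidableEq a l := by
  induction l with
  | nil => rfl
  | cons x xs ih =>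
    rw [List.count_cons, @List.count_cons α instBEqOfDecidableEq, ih]
    by_cases h : x = a
    · simp [h]
    · simp [h]

-- equal counts on all elements of l2 (with equal lengths) characterise permutation
theorem pv_perm_of_counts {α : Type} [BEq α] [LawfulBEq α] [DecidableEq α] {l1 l2 : List α}
    (hlen : l1.length = l2.length) (h : ∀ c ∈ l2, l1.count c = l2.count c) :
    l1.Perm l2 := by
  have h' : ∀ c ∈ l2, @List.count α instBEqOfDecidableEq c l1 = @List.count α instBEqOfDecidableEq c l2 := by
    intro c hc
    rw [← pv_count_inst, ← pv_count_inst]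
    exact h c hc
  have hle : (l2 : Multiset α) ≤ (l1 : Multiset α) := by
    rw [Multiset.le_iff_count]
    intro a
    by_cases ha : a ∈ l2
    · simp [Multiset.coe_count, h' a ha]
    · have h0 : @List.count α instBEqOfDecidableEq a l2 = 0 := by
        rw [← pv_count_inst]
        exact List.count_eq_zero_of_not_mem ha
      simp [Multiset.coe_count, h0]
  have hcard : Multiset.card (l1 : Multiset α) ≤ Multiset.card (l2 : Multiset α) := by
    simpa using hlen.le
  have := Multiset.eq_of_le_of_card_le hle hcard
  exact Multiset.coe_eq_coe.mp this.symm

-- membership in the permutation enumeration of range k ↔ List.Perm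
theorem pv_mem_perms_iff (k : ℕ) (p : List ℕ) :
    p ∈ PySem.List.permutations (List.range k) k ↔ p.Perm (List.range k) := by
  constructor
  · intro h
    exact PySem.List.perm_of_mem_permutations (by simpa using h)
  · intro h
    exact pv_mem_permutations_of_perm k (List.range k) p (by simp) h

-- the column j of the row-permuted matrix, as B computes it
def pvColP (mat1 : List (List Int)) (rp : List ℕ) (j : ℕ) : List Int :=
  rp.map (fun i => (mat1.getD i []).getD j 0)

theorem pv_colP_eq (mat1 : List (List Int)) (rp : List ℕ) (hk : rp.length = mat1.length) (j : ℕ) :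
    (List.range mat1.length).map
        (fun i => ((rp.map (fun i => mat1.getD i [])).getD i []).getD j 0)
      = pvColP mat1 rp j := by
  have h1 : (List.range (rp.map (fun i => mat1.getD i [])).length).map
      (fun i => ((rp.map (fun i => mat1.getD i [])).getD i []).getD j 0)
      = (rp.map (fun i => mat1.getD i [])).map (fun r => r.getD j 0) :=
    pv_range_map_getD _ [] (fun r => r.getD j 0)
  simp only [List.length_map, hk] at h1
  rw [h1, List.map_map]
  rfl

-- A's inner matrix equals mat2 iff mat2 is k×k and its column list is cp.map (pvColP mat1 rp)
theorem pv_inner_iff (mat1 mat2 : List (List Int)) (rp cp : List ℕ)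
    (hrp : rp.length = mat1.length) (hcp : cp.length = mat1.length) :
    ((List.range mat1.length).map
        (fun i => cp.map (fun j => ((rp.map (fun i => mat1.getD i [])).getD i []).getD j 0))
      = mat2)
    ↔ (mat2.length = mat1.length ∧ (∀ r ∈ mat2, r.length = mat1.length) ∧
        (List.range mat1.length).map
            (fun j => (List.range mat1.length).map (fun i => (mat2.getD i []).getD j 0))
          = cp.map (pvColP mat1 rp)) := by
  set k := mat1.length with hk
  constructor
  · intro h
    have hlen2 : mat2.length = k := by rw [← h]; simp
    have hrow : ∀ r ∈ mat2, r.length = k := by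
      intro r hr
      rw [← h] at hr
      obtain ⟨i, _, rfl⟩ := List.mem_map.mp hr
      simp [hcp]
    refine ⟨hlen2, hrow, ?_⟩
    apply List.ext_getElem
    · simp [hcp]
    · intro t ht1 ht2
      simp only [List.length_map, List.length_range] at ht1
      have htc : t < cp.length := by omega
      simp only [List.getElem_map, List.getElem_range]
      have hcol : (List.range k).map (fun i => (mat2.getD i []).getD t 0)
          = (List.range k).map
              (fun i => ((rp.map (fun i => mat1.getD i [])).getD i []).getD (cp[t]) 0) := by
        apply List.map_congr_left
        intro i hi
        have hik : i < k := List.mem_range.mp hi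
        have hi2 : i < mat2.length := by omega
        have hiL : i < ((List.range k).map
            (fun i => cp.map (fun j => ((rp.map (fun i' => mat1.getD i' [])).getD i []).getD j 0))).length := by
          simp; omega
        have hrowi := List.getElem_of_eq h hiL
        simp only [List.getElem_map, List.getElem_range] at hrowi
        rw [List.getD_eq_getElem mat2 [] hi2, ← hrowi]
        rw [List.getD_eq_getElem _ 0 (by simpa using htc)]
        simp
      rw [hcol, pv_colP_eq mat1 rp hrp (cp[t])]
  · rintro ⟨hlen2, hrow, hcols⟩
    apply List.ext_getElem
    · simp [hlen2]
    · intro i hi1 hi2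
      simp only [List.length_map, List.length_range] at hi1
      simp only [List.getElem_map, List.getElem_range]
      apply List.ext_getElem
      · simp [hrow _ (List.getElem_mem hi2), hcp]
      · intro t ht1 ht2
        simp only [List.length_map] at ht1
        simp only [List.getElem_map]
        have htk : t < k := by omega
        have h1 : t < ((List.range k).map
            (fun j => (List.range k).map (fun i => (mat2.getD i []).getD j 0))).length := by
          simp; omega
        have step1 := List.getElem_of_eq hcols h1
        simp only [List.getElem_map, List.getElem_range] at step1
        have h2 : i < ((List.range k).map (fun i => (mat2.getD i []).getD t 0)).length := by
          simp; omega
        have step2 := List.getElem_of_eq step1 h2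
        simp only [List.getElem_map, List.getElem_range, pvColP] at step2
        have hrplen : i < rp.length := by omega
        have hL : ((rp.map (fun i => mat1.getD i [])).getD i []) = mat1.getD (rp[i]) [] := by
          rw [List.getD_eq_getElem _ [] (by simpa using hrplen :
                i < (rp.map (fun i => mat1.getD i [])).length), List.getElem_map]
        simp only [hL]
        rw [List.getD_eq_getElem mat2 [] hi2, List.getD_eq_getElem _ 0
              (by rw [hrow _ (List.getElem_mem hi2)]; omega : t < (mat2[i]).length)] at step2
        exact step2.symm

-- per row permutation: A's inner existential over column permutations ↔ B's shape check and column-count check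
theorem pv_rp_bridge (mat1 mat2 : List (List Int)) (rp : List ℕ)
    (hrp : rp.length = mat1.length) :
    (∃ cp : List ℕ, cp.Perm (List.range mat1.length) ∧
        (List.range mat1.length).map
            (fun i => cp.map (fun j => ((rp.map (fun i => mat1.getD i [])).getD i []).getD j 0))
          = mat2)
    ↔ ((mat2.length == mat1.length && mat2.all (fun r => r.length == mat1.length)) = true ∧
        ((List.range mat1.length).map
            (fun j => (List.range mat1.length).map (fun i => (mat2.getD i []).getD j 0))).all
          (fun c => ((List.range mat1.length).map (pvColP mat1 rp)).count c
              == ((List.range mat1.length).map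
                    (fun j => (List.range mat1.length).map (fun i => (mat2.getD i []).getD j 0))).count c)
          = true) := by
  set k := mat1.length with hk
  set cols2 := (List.range k).map (fun j => (List.range k).map (fun i => (mat2.getD i []).getD j 0)) with hc2
  set cols1 := (List.range k).map (pvColP mat1 rp) with hc1
  constructor
  · rintro ⟨cp, hcp, h⟩
    have hcplen : cp.length = k := (List.Perm.length_eq hcp).trans List.length_range
    rw [pv_inner_iff mat1 mat2 rp cp hrp hcplen] at h
    obtain ⟨h1, h2, h3⟩ := h
    have hperm : cols2.Perm cols1 := by
      rw [hc2, hc1]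
      rw [show ((List.range k).map (fun j => (List.range k).map (fun i => (mat2.getD i []).getD j 0)))
            = cp.map (pvColP mat1 rp) from h3]
      exact hcp.map (pvColP mat1 rp)
    constructor
    · simp only [Bool.and_eq_true, beq_iff_eq, List.all_eq_true]
      exact ⟨h1, fun r hr => h2 r hr⟩
    · simp only [List.all_eq_true, beq_iff_eq]
      intro c _
      exact hperm.symm.count_eq c
  · rintro ⟨hs, hcnt⟩
    simp only [Bool.and_eq_true, beq_iff_eq, List.all_eq_true] at hs
    simp only [List.all_eq_true, beq_iff_eq] at hcnt
    have hlen : cols1.length = cols2.length := by simp [hc1, hc2]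
    have hperm : cols1.Perm cols2 := pv_perm_of_counts hlen hcnt
    obtain ⟨cp, hcp, hmap⟩ := pv_exists_preimage_perm (pvColP mat1 rp) hperm.symm (List.range k) hc1
    refine ⟨cp, hcp, ?_⟩
    rw [pv_inner_iff mat1 mat2 rp cp hrp ((List.Perm.length_eq hcp).trans List.length_range)]
    exact ⟨hs.1, hs.2, hmap⟩

-- the two ports agree on every input
theorem pv_agree (mat1 mat2 : List (List Int)) :
    matrices_are_equivalent mat1 mat2 = matrices_are_equivalent_alt mat1 mat2 := by
  rw [Bool.eq_iff_iff]
  unfold matrices_are_equivalent matrices_are_equivalent_alt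
  simp only [List.any_eq_true, pv_mem_perms_iff, decide_eq_true_eq]
  constructor
  · rintro ⟨rp, hrp, cp, hcp, hin⟩
    have h := (pv_rp_bridge mat1 mat2 rp
        ((List.Perm.length_eq hrp).trans List.length_range)).mp ⟨cp, hcp, hin⟩
    rw [if_pos h.1]
    simp only [List.any_eq_true, pv_mem_perms_iff]
    exact ⟨rp, hrp, by simpa [pvColP] using h.2⟩
  · intro hB
    by_cases hsb : (mat2.length == mat1.length && mat2.all (fun r => r.length == mat1.length)) = true
    · rw [if_pos hsb] at hB
      simp only [List.any_eq_true, pv_mem_perms_iff] at hB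
      obtain ⟨rp, hrp, hcnt⟩ := hB
      obtain ⟨cp, hcp, hin⟩ := (pv_rp_bridge mat1 mat2 rp
          ((List.Perm.length_eq hrp).trans List.length_range)).mpr
        ⟨hsb, by simpa [pvColP] using hcnt⟩
      exact ⟨rp, hrp, cp, hcp, hin⟩
    · rw [if_neg hsb] at hB
      exact absurd hB (by simp)

-- ===== VERDICT (by name: the statement is the Claim_ definition above) =====
theorem matrices_are_equivalent_spec : Claim_equal_matrices_are_equivalent := by
  intro mat1 mat2 _ _
  unfold Spec_matrices_are_equivalent
  exact pv_agree mat1 mat2
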